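-- pv_equiv track=rewrite | github.com/gdormoy/CryptoDES | Bonus/utils.py | convert_64bit_to_56bit_key
-- ===== SOURCE A (Python) =====
-- def convert_64bit_to_56bit_key(Key) :
--     tmp = ' ' + Key
--     newKey = ''
--     count = 0
--     for x in range(len(tmp)):
--         if x % 8 != 0:
--             newKey += tmp[x]
--             if tmp[x] == '1':
--                 count += 1
--         elif x % 8 == 0 and x != 0:
--             if tmp[x] == '1':
--                 count += 1
--             if count % 2 == 0:
--                 return "error"
--             count = 0
--     return newKey
-- ===== SOURCE B (Python) =====
-- def convert_64bit_to_56bit_key(Key):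
--     out = []
--     for i in range(0, len(Key), 8):
--         block = Key[i:i+8]
--         if len(block) == 8:
--             if block.count('1') % 2 == 0:
--                 return "error"
--             out.append(block[:7])
--         else:
--             out.append(block)
--     return ''.join(out)
-- ===== Notes on version B (the rewrite author's own statement) =====
-- stated objective: simpler
-- what changed: B walks the key in fixed 8-character slices, checking each full block's parity with count() and keeping its first 7 characters, instead of A's per-character loop over a space-padded string with a running parity counter.
import Mathlib
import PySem

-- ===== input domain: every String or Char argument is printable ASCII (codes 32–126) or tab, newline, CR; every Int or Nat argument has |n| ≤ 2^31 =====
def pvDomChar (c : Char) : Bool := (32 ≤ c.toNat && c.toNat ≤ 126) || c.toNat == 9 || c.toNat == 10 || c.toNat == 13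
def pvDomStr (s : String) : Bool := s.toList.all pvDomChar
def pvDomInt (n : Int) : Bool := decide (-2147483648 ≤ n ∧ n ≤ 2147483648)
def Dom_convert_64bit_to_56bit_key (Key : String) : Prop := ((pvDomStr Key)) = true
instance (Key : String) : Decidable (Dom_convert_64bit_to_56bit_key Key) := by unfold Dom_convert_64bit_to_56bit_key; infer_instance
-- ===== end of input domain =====

-- B walks the key in fixed 8-character slices (parity check per full block, keep first 7 chars,
-- trailing short block kept whole) instead of A's per-character loop with a running parity counter: simpler decomposition, same values.

-- ===== PORT A =====
-- A's loop over x in range(len(tmp)), tmp = ' ' + Key; state: newKey, count; early return "error".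
def pvALoop : List Char → Nat → List Char → Int → String
  | [], _, newKey, _ => String.mk newKey
  | c :: cs, x, newKey, count =>
    if x % 8 ≠ 0 then
      pvALoop cs (x + 1) (newKey ++ [c]) (count + (if c = '1' then 1 else 0))
    else if x % 8 = 0 ∧ x ≠ 0 then
      let count' := count + (if c = '1' then 1 else 0)
      if count' % 2 = 0 then "error" else pvALoop cs (x + 1) newKey 0
    else
      pvALoop cs (x + 1) newKey count

def convert_64bit_to_56bit_key (Key : String) : String :=
  pvALoop (' ' :: Key.toList) 0 [] 0

-- ===== PORT B =====
-- B's per-slice loop: block = next 8 chars; full block → parity check, keep block[:7]; short block kept whole.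
def pvBLoop : List Char → List (List Char) → String
  | [], acc => String.mk acc.reverse.flatten
  | l@(_ :: _), acc =>
    let block := l.take 8
    if block.length = 8 then
      if block.count '1' % 2 = 0 then "error"
      else pvBLoop (l.drop 8) (block.take 7 :: acc)
    else String.mk (acc.reverse ++ [block]).flatten
  termination_by l _ => l.length
  decreasing_by simp_all

def convert_64bit_to_56bit_key_alt (Key : String) : String :=
  pvBLoop Key.toList []

-- ===== PRECONDITION & SPEC =====
def Spec_convert_64bit_to_56bit_key (Key : String) (out : String) : Prop := out = convert_64bit_to_56bit_key_alt Key
instance (Key : String) (out : String) : Decidable (Spec_convert_64bit_to_56bit_key Key out) := by unfold Spec_convert_64bit_to_56bit_key; infer_instance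

-- ===== CLAIM (what is proved, stated in full; the proofs are below) =====
def Claim_equal_convert_64bit_to_56bit_key : Prop := ∀ (Key : String), Dom_convert_64bit_to_56bit_key Key → Spec_convert_64bit_to_56bit_key Key (convert_64bit_to_56bit_key Key)

-- ===== LEMMAS AND PROOFS =====

-- count of '1' chars as an Int, in the accumulation order A uses
def pvCnt1 : List Char → Int
  | [] => 0
  | c :: l => (if c = '1' then 1 else 0) + pvCnt1 l

theorem pvCnt1_count (l : List Char) : pvCnt1 l = (l.count '1' : Int) := by
  induction l with
  | nil => simp [pvCnt1]
  | cons c l ih =>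
    simp [pvCnt1, List.count_cons, ih]
    by_cases h : c = '1' <;> simp [h] <;> omega

-- a short run of data positions (all x % 8 ≠ 0) just appends every char
theorem pvALoop_short (l : List Char) : ∀ (x : Nat) (acc : List Char) (count : Int),
    1 ≤ x % 8 → x % 8 + l.length ≤ 8 → pvALoop l x acc count = String.mk (acc ++ l) := by
  induction l with
  | nil => intro x acc count _ _; simp [pvALoop]
  | cons c l ih =>
    intro x acc count h1 h2
    have hx : x % 8 ≠ 0 := by omega
    rw [pvALoop, if_pos hx]
    cases l with
    | nil => simp [pvALoop]
    | cons d l' =>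
      have hx6 : x % 8 ≤ 6 := by
        simp only [List.length_cons] at h2; omega
      rw [ih (x + 1) (acc ++ [c]) _ (by omega)
        (by simp only [List.length_cons] at h2 ⊢; omega)]
      simp

-- one full 8-char block: 7 data chars then the parity char
theorem pvALoop_block (d : List Char) : ∀ (x : Nat) (p : Char) (rest acc : List Char) (count : Int),
    0 < x → x % 8 = (8 - d.length) % 8 → d.length ≤ 7 →
    pvALoop (d ++ p :: rest) x acc count =
      if (count + pvCnt1 d + (if p = '1' then 1 else 0)) % 2 = 0 then "error"
      else pvALoop rest (x + d.length + 1) (acc ++ d) 0 := by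
  induction d with
  | nil =>
    intro x p rest acc count hx hm _
    simp at hm
    have hx8 : ¬ x % 8 ≠ 0 := by omega
    rw [List.nil_append, pvALoop, if_neg hx8, if_pos ⟨by omega, by omega⟩]
    simp [pvCnt1]
  | cons c d ih =>
    intro x p rest acc count hx hm hd
    have hlen : d.length ≤ 6 := by simp at hd; omega
    have hx8 : x % 8 ≠ 0 := by simp at hm; omega
    rw [List.cons_append, pvALoop, if_pos hx8,
        ih (x + 1) p rest (acc ++ [c]) _ (by omega) (by simp at hm ⊢; omega) (by omega)]
    have : count + (if c = '1' then 1 else 0) + pvCnt1 d = count + pvCnt1 (c :: d) := by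
      simp [pvCnt1]; ring
    rw [this]
    simp [Nat.add_assoc, Nat.add_comm 1 d.length]

-- main invariant: starting at a position ≡ 1 (mod 8), A's loop computes B's slice loop
theorem pvMain (n : Nat) : ∀ (l : List Char), l.length ≤ n → ∀ (x : Nat) (acc : List (List Char)),
    x % 8 = 1 → pvALoop l x acc.reverse.flatten 0 = pvBLoop l acc := by
  induction n with
  | zero =>
    intro l hl x acc hx
    have : l = [] := List.eq_nil_of_length_eq_zero (by omega)
    subst this; simp [pvALoop, pvBLoop.eq_1]
  | succ n ih =>
    intro l hl x acc hx
    by_cases hlen : l.length < 8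
    · -- short trailing block: appended unchecked
      cases l with
      | nil => simp [pvALoop, pvBLoop.eq_1]
      | cons c l' =>
        rw [pvBLoop.eq_def]
        have htake : (c :: l').take 8 = c :: l' := List.take_of_length_le (by omega)
        simp only [htake]
        have h8 : ¬ (c :: l').length = 8 := by omega
        rw [if_neg h8]
        rw [pvALoop_short (c :: l') x _ 0 (by omega) (by omega)]
        simp
    · -- full block of 8
      rcases l with _|⟨c0,_|⟨c1,_|⟨c2,_|⟨c3,_|⟨c4,_|⟨c5,_|⟨c6,_|⟨c7,rest⟩⟩⟩⟩⟩⟩⟩⟩ <;>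
        try (simp only [List.length_cons, List.length_nil] at hlen; omega)
      have hblk := pvALoop_block [c0, c1, c2, c3, c4, c5, c6] x c7 rest
        acc.reverse.flatten 0 (by omega) (by simp; omega) (by simp)
      simp only [List.cons_append, List.nil_append] at hblk
      rw [hblk, pvBLoop.eq_def]
      simp only [List.take_succ_cons, List.take_zero, List.length_cons, List.length_nil]
      have hcond : ((0 : Int) + pvCnt1 [c0, c1, c2, c3, c4, c5, c6] + (if c7 = '1' then 1 else 0)) % 2 = 0
          ↔ ([c0, c1, c2, c3, c4, c5, c6, c7] : List Char).count '1' % 2 = 0 := by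
        have h1 : pvCnt1 [c0, c1, c2, c3, c4, c5, c6] + (if c7 = '1' then 1 else 0)
            = pvCnt1 [c0, c1, c2, c3, c4, c5, c6, c7] := by
          simp [pvCnt1]; ring
        rw [Int.zero_add, h1, pvCnt1_count]
        omega
      by_cases hpar : ([c0, c1, c2, c3, c4, c5, c6, c7] : List Char).count '1' % 2 = 0
      · rw [if_pos (hcond.mpr hpar)]
        simp [hpar]
      · rw [if_neg (fun h => hpar (hcond.mp h))]
        have hacc : acc.reverse.flatten ++ [c0, c1, c2, c3, c4, c5, c6]
            = (([c0, c1, c2, c3, c4, c5, c6] : List Char) :: acc).reverse.flatten := by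
          simp
        rw [hacc, ih rest (by simp at hl; omega) (x + 7 + 1) _ (by omega)]
        simp [hpar]

-- ===== VERDICT (by name: the statement is the Claim_ definition above) =====
theorem convert_64bit_to_56bit_key_spec : Claim_equal_convert_64bit_to_56bit_key := by
  intro Key _
  unfold Spec_convert_64bit_to_56bit_key convert_64bit_to_56bit_key convert_64bit_to_56bit_key_alt
  rw [pvALoop]
  simp only [Nat.zero_mod, ne_eq, not_true_eq_false, if_false, and_false, if_false]
  have := pvMain Key.toList.length Key.toList (Nat.le_refl _) 1 [] (by decide)
  simpa using this
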